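-- pv_equiv track=rewrite | github.com/zhangzihaoDT/MyObsidianNotes | .skill/doc-folder-tagger/scripts/organize_and_tag.py | render_yaml_frontmatter
-- ===== SOURCE A (Python) =====
-- from typing import Dict, List, Optional, Tuple
--
-- def render_yaml_frontmatter(d: Dict[str, str]) -> str:
--     keys = list(d.keys())
--     # 固定顺序：category/created_at/updated_at 优先
--     order = ["category", "created_at", "updated_at"]
--     rest = [k for k in keys if k not in order]
--     out_keys = [k for k in order if k in d] + sorted(rest)
--     lines = ["---"]
--     for k in out_keys:
--         lines.append(f"{k}: {d[k]}")
--     lines.append("---\n")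
--     return "\n".join(lines)
-- ===== SOURCE B (Python) =====
-- def render_yaml_frontmatter(d):
--     order = ["category", "created_at", "updated_at"]
--
--     def rank(k):
--         return (order.index(k), "") if k in order else (len(order), k)
--
--     body = "".join(f"{k}: {d[k]}\n" for k in sorted(d, key=rank))
--     return "---\n" + body + "---\n"
-- ===== Notes on version B (the rewrite author's own statement) =====
-- stated objective: alternative
-- what changed: Replaces A's partition-then-concatenate key ordering (filter priority keys, then sorted(rest)) with a single sorted() over the keys under a composite (rank, key) sort key, and assembles the output by joining per-key lines that carry their own newline instead of '\n'.join over a lines list.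
import Mathlib
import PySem

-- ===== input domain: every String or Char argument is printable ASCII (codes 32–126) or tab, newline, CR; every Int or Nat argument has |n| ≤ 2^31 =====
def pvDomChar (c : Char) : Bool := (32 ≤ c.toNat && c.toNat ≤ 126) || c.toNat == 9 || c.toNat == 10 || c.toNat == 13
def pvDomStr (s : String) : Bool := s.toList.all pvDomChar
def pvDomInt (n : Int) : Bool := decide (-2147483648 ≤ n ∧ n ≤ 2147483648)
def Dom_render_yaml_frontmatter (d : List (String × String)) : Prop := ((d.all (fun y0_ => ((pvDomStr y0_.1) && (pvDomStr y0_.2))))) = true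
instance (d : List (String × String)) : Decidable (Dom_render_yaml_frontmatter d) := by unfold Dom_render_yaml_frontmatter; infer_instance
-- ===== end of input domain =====

-- B replaces A's partition-then-concatenate key ordering with a single composite-key sort
-- and assembles the output from newline-terminated lines (objective: alternative).

-- ===== PORT A =====
-- A: keys = list(d.keys()); rest = keys not in order; out_keys = priority-filtered ++ sorted(rest);
--    lines built by a loop appending "k: v"; "\n".join(lines ++ ["---\n"]).
def render_yaml_frontmatter (d : List (String × String)) : String :=
  let D := PySem.Dict.ofList d
  let keys := D.keys
  let order : List String := ["category", "created_at", "updated_at"]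
  let rest := keys.filter (fun k => !(order.contains k))
  let out_keys := (order.filter (fun k => D.contains k)) ++ PySem.List.sorted rest (fun x => x) false
  let lines := out_keys.foldl (fun acc k => acc ++ [k ++ ": " ++ D.getD k ""]) ["---"]
  PySem.Str.join "\n" (lines ++ ["---\n"])

-- ===== PORT B =====
-- B: one sort of the keys under the composite key (rank, tie) — rank = order.index(k) for the
--    three priority keys (tie ""), rank = len(order) with tie = k otherwise — then join lines
--    that each carry their own newline, between "---\n" fences.
def render_yaml_frontmatter_alt (d : List (String × String)) : String :=
  let D := PySem.Dict.ofList d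
  let order : List String := ["category", "created_at", "updated_at"]
  let sortedKeys := PySem.List.sorted2 D.keys
    (fun k => if order.contains k then (((PySem.List.index? order k).getD 0 : Nat) : Int) else (3 : Int))
    (fun k => if order.contains k then "" else k) false
  let body := PySem.Str.join "" (sortedKeys.map (fun k => k ++ ": " ++ D.getD k "" ++ "\n"))
  "---\n" ++ body ++ "---\n"

-- ===== PRECONDITION & SPEC =====
def Spec_render_yaml_frontmatter (d : List (String × String)) (out : String) : Prop := out = render_yaml_frontmatter_alt d
instance (d : List (String × String)) (out : String) : Decidable (Spec_render_yaml_frontmatter d out) := by unfold Spec_render_yaml_frontmatter; infer_instance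

-- ===== CLAIM (what is proved, stated in full; the proofs are below) =====
def Claim_equal_render_yaml_frontmatter : Prop := ∀ (d : List (String × String)), Dom_render_yaml_frontmatter d → Spec_render_yaml_frontmatter d (render_yaml_frontmatter d)

-- ===== LEMMAS AND PROOFS =====

-- proof-side names for B's priority list and composite sort key
def pvOrder : List String := ["category", "created_at", "updated_at"]
def pvK1 (k : String) : Int := if pvOrder.contains k then (((PySem.List.index? pvOrder k).getD 0 : Nat) : Int) else 3
def pvK2 (k : String) : String := if pvOrder.contains k then "" else k
def pvK (k : String) : Lex (Int × String) := toLex (pvK1 k, pvK2 k)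

theorem pvK_lt_of_order_mem (a b : String) (ha : a ∈ pvOrder) (hb : b ∉ pvOrder) : pvK a < pvK b := by
  have h1 : pvK1 a < 3 := by fin_cases ha <;> decide
  have h2 : pvK1 b = 3 := by simp [pvK1, hb]
  have : pvK1 a < pvK1 b := by omega
  exact Prod.Lex.lt_iff.mpr (Or.inl this)

theorem pvK_lt_of_not_order (a b : String) (ha : a ∉ pvOrder) (hb : b ∉ pvOrder) (h : a < b) : pvK a < pvK b := by
  apply Prod.Lex.lt_iff.mpr
  simp only [pvK, ofLex_toLex]
  right
  refine ⟨by simp [pvK1, ha, hb], ?_⟩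
  simpa [pvK2, ha, hb] using h

theorem order_pairwise : pvOrder.Pairwise (fun a b => pvK a < pvK b) := by
  have h01 : pvK "category" < pvK "created_at" := Prod.Lex.lt_iff.mpr (Or.inl (by decide))
  have h02 : pvK "category" < pvK "updated_at" := Prod.Lex.lt_iff.mpr (Or.inl (by decide))
  have h12 : pvK "created_at" < pvK "updated_at" := Prod.Lex.lt_iff.mpr (Or.inl (by decide))
  simp [pvOrder, List.pairwise_cons, h01, h02, h12]

-- sorted2 with two keys is sorted with the lexicographic pair key
theorem sorted2_eq_sorted_lex {α κ₁ κ₂ : Type} [LinearOrder κ₁] [LinearOrder κ₂]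
    (xs : List α) (k1 : α → κ₁) (k2 : α → κ₂) :
    PySem.List.sorted2 xs k1 k2 false
      = PySem.List.sorted xs (fun x => toLex (k1 x, k2 x)) false := by
  unfold PySem.List.sorted2 PySem.List.sorted
  simp only [Bool.false_eq_true, if_false]
  congr 1
  funext acc x
  congr 1
  funext a b
  simp only [Prod.Lex.lt_iff, ofLex_toLex]
  rcases lt_trichotomy (k1 a) (k1 b) with h | h | h
  · simp [h, not_lt.mpr (le_of_lt h)]
  · simp [h]
  · simp [not_lt.mpr (le_of_lt h), ne_of_gt h, h]

-- B's single composite-key sort of a duplicate-free key list equals A's partitioned key order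
theorem keys_order (keys : List String) (hnd : keys.Nodup) (p : String → Bool)
    (hp : ∀ k, p k = true ↔ k ∈ keys) :
    PySem.List.sorted2 keys pvK1 pvK2 false
      = pvOrder.filter p
        ++ PySem.List.sorted (keys.filter (fun k => !(pvOrder.contains k))) (fun x => x) false := by
  have hrestnd : (keys.filter (fun k => !(pvOrder.contains k))).Nodup := hnd.filter _
  have hsp := PySem.List.sorted_perm (keys.filter (fun k => !(pvOrder.contains k))) (fun x => x) false
  have h1 : (pvOrder.filter p).Perm (keys.filter (fun k => pvOrder.contains k)) := by
    rw [List.perm_ext_iff_of_nodup ((by decide : pvOrder.Nodup).filter _) (hnd.filter _)]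
    intro a
    simp only [List.mem_filter, hp, List.contains_iff_mem]
    constructor
    · rintro ⟨h₁, h₂⟩; exact ⟨h₂, by simpa using h₁⟩
    · rintro ⟨h₁, h₂⟩; exact ⟨by simpa using h₂, h₁⟩
  have hperm : (pvOrder.filter p
      ++ PySem.List.sorted (keys.filter (fun k => !(pvOrder.contains k))) (fun x => x) false).Perm keys :=
    ((h1.append hsp).trans (List.filter_append_perm _ keys))
  have hmemrest : ∀ b ∈ PySem.List.sorted (keys.filter (fun k => !(pvOrder.contains k))) (fun x => x) false,
      b ∉ pvOrder := by
    intro b hb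
    have := hsp.mem_iff.mp hb
    simp only [List.mem_filter, Bool.not_eq_eq_eq_not, Bool.not_true] at this
    simpa using this.2
  have hpair : (pvOrder.filter p
      ++ PySem.List.sorted (keys.filter (fun k => !(pvOrder.contains k))) (fun x => x) false).Pairwise
      (fun a b => pvK a < pvK b) := by
    rw [List.pairwise_append]
    refine ⟨order_pairwise.sublist List.filter_sublist, ?_, ?_⟩
    · have hle := PySem.List.sorted_pairwise (keys.filter (fun k => !(pvOrder.contains k))) (fun x => x)
      have hne : (PySem.List.sorted (keys.filter (fun k => !(pvOrder.contains k))) (fun x => x) false).Nodup :=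
        hsp.nodup_iff.mpr hrestnd
      have hlt := hle.and hne
      refine hlt.imp_of_mem ?_
      intro a b hma hmb hab
      exact pvK_lt_of_not_order a b (hmemrest a hma) (hmemrest b hmb) (lt_of_le_of_ne hab.1 hab.2)
    · intro a ha b hb
      exact pvK_lt_of_order_mem a b (List.mem_filter.mp ha).1 (hmemrest b hb)
  rw [sorted2_eq_sorted_lex keys pvK1 pvK2]
  exact PySem.List.sorted_eq_of_perm_of_pairwise_lt _ _ _ hperm hpair

-- join "" distributes over a leading element
theorem chars_join_empty_cons (c : List Char) (cs : List (List Char)) :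
    PySem.Chars.join [] (c :: cs) = c ++ PySem.Chars.join [] cs := by
  cases cs with
  | nil => simp [PySem.Chars.join, List.intercalate]
  | cons q rest => rw [PySem.Chars.join_cons_cons]; simp

theorem chars_join_nl (F : List Char) (a : List Char) (ls : List (List Char)) :
    PySem.Chars.join ['\n'] (a :: (ls ++ [F]))
      = a ++ ['\n'] ++ PySem.Chars.join [] (ls.map (· ++ ['\n'])) ++ F := by
  induction ls generalizing a with
  | nil =>
    rw [List.nil_append, PySem.Chars.join_cons_cons]
    simp [PySem.Chars.join, List.intercalate]
  | cons b t ih =>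
    rw [List.cons_append, PySem.Chars.join_cons_cons, ih b]
    rw [List.map_cons, chars_join_empty_cons]
    simp

-- "\n".join over "---" :: lines :: "---\n" equals concatenating newline-terminated lines between fences
theorem join_newline_lines (ls : List String) :
    PySem.Str.join "\n" ("---" :: (ls ++ ["---\n"]))
      = "---\n" ++ PySem.Str.join "" (ls.map (fun s => s ++ "\n")) ++ "---\n" := by
  apply String.toList_inj.mp
  simp only [PySem.Str.toList_join, String.toList_append, List.map_append, List.map_cons,
    List.map_nil, List.map_map]
  have hsep : String.toList "\n" = ['\n'] := rfl
  have h1 : String.toList "---" = ['-','-','-'] := rfl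
  have h2 : String.toList "---\n" = ['-','-','-','\n'] := rfl
  have h3 : String.toList "" = ([] : List Char) := rfl
  rw [hsep, h1, h2, h3, chars_join_nl]
  have : (List.map (String.toList ∘ fun s => s ++ "\n") ls) = (ls.map String.toList).map (· ++ ['\n']) := by
    simp only [List.map_map]
    apply List.map_congr_left
    intro x _
    simp [Function.comp, String.toList_append]
  rw [this]
  simp

-- instantiation of keys_order at the dict built from the input
theorem out_keys_eq (d : List (String × String)) :
    PySem.List.sorted2 (PySem.Dict.ofList d).keys
      (fun k => if (["category", "created_at", "updated_at"] : List String).contains k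
                then (((PySem.List.index? ["category", "created_at", "updated_at"] k).getD 0 : Nat) : Int) else (3 : Int))
      (fun k => if (["category", "created_at", "updated_at"] : List String).contains k then "" else k) false
    = ((["category", "created_at", "updated_at"] : List String).filter
         (fun k => (PySem.Dict.ofList d).contains k))
      ++ PySem.List.sorted ((PySem.Dict.ofList d).keys.filter
         (fun k => !((["category", "created_at", "updated_at"] : List String).contains k))) (fun x => x) false :=
  keys_order (PySem.Dict.ofList d).keys (PySem.Dict.nodup_keys_ofList d)
    (fun k => (PySem.Dict.ofList d).contains k)
    (fun k => PySem.Dict.contains_iff_mem_keys (PySem.Dict.ofList d) k)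

-- ===== VERDICT (by name: the statement is the Claim_ definition above) =====
theorem render_yaml_frontmatter_spec : Claim_equal_render_yaml_frontmatter := by
  intro d _
  unfold Spec_render_yaml_frontmatter render_yaml_frontmatter render_yaml_frontmatter_alt
  dsimp only
  rw [out_keys_eq d, PySem.List.foldl_append_singleton_eq_map]
  rw [show (["---"] : List String) ++ _ = "---" :: _ from List.singleton_append, List.cons_append]
  rw [join_newline_lines, List.map_map]
  simp only [Function.comp_def]
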